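-- pv_equiv track=rewrite | github.com/tatargabor/set-core | lib/set_orch/verifier.py | _parse_review_issues
-- ===== SOURCE A (Python) =====
-- def _parse_review_issues(review_output: str) -> list[dict]:
--     """Parse review output into structured issue dicts.
--
--     Severity is derived ONLY from the inline `[LOW|MEDIUM|HIGH|CRITICAL]`
--     tag on the `ISSUE:` line — single source of truth. A secondary body
--     or summary scan would produce the severity drift observed in the
--     log audit (9/30 findings where inline tag and summary scan disagreed).
--
--     Reuses the same format as _extract_review_fixes but returns structured data
--     instead of a text string. Each issue has: severity, summary, file, line, fix.
--
--     NOTE: this parser only handles the first-round review format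
--     (`ISSUE: [TAG]` inline). Retry reviews use a different markdown
--     structure (`### Finding N:` headers, `**NOT_FIXED** [CRITICAL]`
--     annotations) that this parser does NOT recognise — that format is
--     handled by the LLM verdict classifier fallback in `review_change()`.
--     """
--     issues = []
--     current: dict = {}
--
--     for line in review_output.split("\n"):
--         stripped = line.strip()
--         if stripped.startswith("ISSUE:") or stripped.startswith("**ISSUE:"):
--             if current.get("summary"):
--                 issues.append(current)
--             text = stripped.lstrip("*").lstrip()
--             if text.startswith("ISSUE:"):
--                 text = text[6:].strip()
--             # Severity: inline [TAG] on the ISSUE line is the single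
--             # source of truth. Default to MEDIUM when no tag is present
--             # (matches long-standing behaviour; the classifier fallback
--             # handles unusual formats).
--             severity = "MEDIUM"
--             if "[CRITICAL]" in text:
--                 severity = "CRITICAL"
--             elif "[HIGH]" in text:
--                 severity = "HIGH"
--             elif "[LOW]" in text:
--                 severity = "LOW"
--             current = {"severity": severity, "summary": text, "file": "", "line": "", "fix": ""}
--         elif stripped.startswith("FILE:") or stripped.startswith("**FILE:"):
--             current["file"] = stripped.lstrip("*").lstrip()[5:].strip().strip("`")
--         elif stripped.startswith("LINE:"):
--             current["line"] = stripped[5:].strip().lstrip("~")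
--         elif stripped.startswith("FIX:") or stripped.startswith("Fix:"):
--             current["fix"] = stripped[4:].strip()
--
--     if current.get("summary"):
--         issues.append(current)
--
--     return issues
-- ===== SOURCE B (Python) =====
-- # B: grouping decomposition — split lines into ISSUE-led blocks, then parse each
-- # block independently (per-field reverse scan = last-write-wins), filtering out
-- # empty-summary blocks; replaces A's accumulate-and-flush state machine.
--
-- _SEV_TAGS = (("CRITICAL", "[CRITICAL]"), ("HIGH", "[HIGH]"), ("LOW", "[LOW]"))
--
--
-- def _is_issue(s):
--     return s.startswith("ISSUE:") or s.startswith("**ISSUE:")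
--
--
-- def _blocks(lines):
--     out = []
--     i = 0
--     n = len(lines)
--     while i < n:
--         j = i + 1
--         while j < n and not _is_issue(lines[j]):
--             j += 1
--         out.append((lines[i], lines[i + 1:j]))
--         i = j
--     return out
--
--
-- def _parse_block(head, body):
--     text = head.lstrip("*").lstrip()
--     if text.startswith("ISSUE:"):
--         text = text[6:].strip()
--     if not text:
--         return None
--     severity = next((sev for sev, tag in _SEV_TAGS if tag in text), "MEDIUM")
--     file_ = next((s.lstrip("*").lstrip()[5:].strip().strip("`")
--                   for s in reversed(body)
--                   if s.startswith("FILE:") or s.startswith("**FILE:")), "")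
--     line = next((s[5:].strip().lstrip("~")
--                  for s in reversed(body) if s.startswith("LINE:")), "")
--     fix = next((s[4:].strip()
--                 for s in reversed(body)
--                 if s.startswith("FIX:") or s.startswith("Fix:")), "")
--     return {"severity": severity, "summary": text,
--             "file": file_, "line": line, "fix": fix}
--
--
-- def _parse_review_issues(review_output: str) -> list[dict]:
--     lines = [ln.strip() for ln in review_output.split("\n")]
--     start = 0
--     while start < len(lines) and not _is_issue(lines[start]):
--         start += 1
--     issues = []
--     for head, body in _blocks(lines[start:]):
--         d = _parse_block(head, body)
--         if d is not None:
--             issues.append(d)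
--     return issues
-- ===== Notes on version B (the rewrite author's own statement) =====
-- stated objective: alternative
-- what changed: Replaced A's single-pass accumulate-and-flush state machine (a mutable 'current' dict flushed at each next ISSUE line and at EOF) by explicit grouping: split the stripped lines into ISSUE-led blocks, then parse each block independently, extracting each FILE/LINE/FIX field by a per-field reverse scan (first match from the end = last write wins) and filtering out empty-summary blocks.
import Mathlib
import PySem

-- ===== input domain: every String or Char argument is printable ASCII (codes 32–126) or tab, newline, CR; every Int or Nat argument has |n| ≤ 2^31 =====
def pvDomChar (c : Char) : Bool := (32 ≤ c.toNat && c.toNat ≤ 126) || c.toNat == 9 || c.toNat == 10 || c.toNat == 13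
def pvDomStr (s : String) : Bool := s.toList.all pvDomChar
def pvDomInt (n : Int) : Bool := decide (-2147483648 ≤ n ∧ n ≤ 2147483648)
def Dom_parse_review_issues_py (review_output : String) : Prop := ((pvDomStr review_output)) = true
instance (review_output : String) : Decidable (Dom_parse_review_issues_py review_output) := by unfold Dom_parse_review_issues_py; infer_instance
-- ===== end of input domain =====

-- B replaces A's accumulate-and-flush state machine by grouping the lines into
-- ISSUE-led blocks and parsing each block independently (objective: alternative).

-- ===== PORT A =====
-- s.lstrip("*") (set of chars = {'*'}): drop leading '*' — exact hand port
def pyLstripStar (s : String) : String := String.ofList (s.toList.dropWhile (fun c => c == '*'))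
-- s.lstrip("~"): drop leading '~' — exact hand port
def pyLstripTilde (s : String) : String := String.ofList (s.toList.dropWhile (fun c => c == '~'))

def pyIssueStep (st : List (List (String × String)) × PySem.Dict String String) (line : String) :
    List (List (String × String)) × PySem.Dict String String :=
  let stripped := PySem.Str.strip line
  let issues := st.1
  let current := st.2
  if PySem.Str.startswith stripped "ISSUE:" || PySem.Str.startswith stripped "**ISSUE:" then
    let issues := if (current.getD "summary" "") ≠ "" then issues ++ [current.items] else issues
    let text := PySem.Str.lstrip (pyLstripStar stripped)
    let text := if PySem.Str.startswith text "ISSUE:" then PySem.Str.strip (PySem.Str.slice text (some 6) none) else text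
    let severity :=
      if PySem.Str.isIn "[CRITICAL]" text then "CRITICAL"
      else if PySem.Str.isIn "[HIGH]" text then "HIGH"
      else if PySem.Str.isIn "[LOW]" text then "LOW"
      else "MEDIUM"
    (issues, ((((PySem.Dict.empty.insert "severity" severity).insert "summary" text).insert "file" "").insert "line" "").insert "fix" "")
  else if PySem.Str.startswith stripped "FILE:" || PySem.Str.startswith stripped "**FILE:" then
    (issues, current.insert "file" (PySem.Str.stripChars (PySem.Str.strip (PySem.Str.slice (PySem.Str.lstrip (pyLstripStar stripped)) (some 5) none)) "`"))
  else if PySem.Str.startswith stripped "LINE:" then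
    (issues, current.insert "line" (pyLstripTilde (PySem.Str.strip (PySem.Str.slice stripped (some 5) none))))
  else if PySem.Str.startswith stripped "FIX:" || PySem.Str.startswith stripped "Fix:" then
    (issues, current.insert "fix" (PySem.Str.strip (PySem.Str.slice stripped (some 4) none)))
  else (issues, current)

def parse_review_issues_py (review_output : String) : List (List (String × String)) :=
  -- split("\n"): split? is none only for sep = "", which "\n" is not
  match PySem.Str.split? review_output "\n" with
  | none => []
  | some lines =>
    let st := lines.foldl pyIssueStep ([], PySem.Dict.empty)
    if (st.2.getD "summary" "") ≠ "" then st.1 ++ [st.2.items] else st.1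

-- ===== PORT B =====
def altIsIssue (s : String) : Bool :=
  PySem.Str.startswith s "ISSUE:" || PySem.Str.startswith s "**ISSUE:"

def altSevTags : List (String × String) :=
  [("CRITICAL", "[CRITICAL]"), ("HIGH", "[HIGH]"), ("LOW", "[LOW]")]

-- group into (ISSUE head line, following body lines up to the next ISSUE line)
def altBlocks : List String → List (String × List String)
  | [] => []
  | h :: rest =>
      (h, rest.takeWhile (fun t => !altIsIssue t)) ::
        altBlocks (rest.dropWhile (fun t => !altIsIssue t))
termination_by l => l.length
decreasing_by
  exact Nat.lt_succ_of_le (List.length_dropWhile_le _ _)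

def altParseBlock (head : String) (body : List String) : Option (List (String × String)) :=
  let text := PySem.Str.lstrip (pyLstripStar head)
  let text := if PySem.Str.startswith text "ISSUE:" then PySem.Str.strip (PySem.Str.slice text (some 6) none) else text
  if text = "" then none
  else
    let severity := ((altSevTags.find? (fun p => PySem.Str.isIn p.2 text)).map Prod.fst).getD "MEDIUM"
    let file := ((body.reverse.find? (fun s => PySem.Str.startswith s "FILE:" || PySem.Str.startswith s "**FILE:")).map
        (fun s => PySem.Str.stripChars (PySem.Str.strip (PySem.Str.slice (PySem.Str.lstrip (pyLstripStar s)) (some 5) none)) "`")).getD ""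
    let line := ((body.reverse.find? (fun s => PySem.Str.startswith s "LINE:")).map
        (fun s => pyLstripTilde (PySem.Str.strip (PySem.Str.slice s (some 5) none)))).getD ""
    let fix := ((body.reverse.find? (fun s => PySem.Str.startswith s "FIX:" || PySem.Str.startswith s "Fix:")).map
        (fun s => PySem.Str.strip (PySem.Str.slice s (some 4) none))).getD ""
    some [("severity", severity), ("summary", text), ("file", file), ("line", line), ("fix", fix)]

def parse_review_issues_py_alt (review_output : String) : List (List (String × String)) :=
  match PySem.Str.split? review_output "\n" with
  | none => []
  | some rawLines =>
    let lines := rawLines.map PySem.Str.strip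
    let rest := lines.dropWhile (fun s => !altIsIssue s)
    (altBlocks rest).filterMap (fun b => altParseBlock b.1 b.2)

-- ===== PRECONDITION & SPEC =====
def Spec_parse_review_issues_py (review_output : String) (out : List (List (String × String))) : Prop := out = parse_review_issues_py_alt review_output
instance (review_output : String) (out : List (List (String × String))) : Decidable (Spec_parse_review_issues_py review_output out) := by unfold Spec_parse_review_issues_py; infer_instance

-- ===== CLAIM (what is proved, stated in full; the proofs are below) =====
def Claim_equal_parse_review_issues_py : Prop := ∀ (review_output : String), Dom_parse_review_issues_py review_output → Spec_parse_review_issues_py review_output (parse_review_issues_py review_output)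

-- ===== LEMMAS AND PROOFS =====

-- A's step on an already-stripped line
def stepS (st : List (List (String × String)) × PySem.Dict String String) (stripped : String) :
    List (List (String × String)) × PySem.Dict String String :=
  let issues := st.1
  let current := st.2
  if PySem.Str.startswith stripped "ISSUE:" || PySem.Str.startswith stripped "**ISSUE:" then
    let issues := if (current.getD "summary" "") ≠ "" then issues ++ [current.items] else issues
    let text := PySem.Str.lstrip (pyLstripStar stripped)
    let text := if PySem.Str.startswith text "ISSUE:" then PySem.Str.strip (PySem.Str.slice text (some 6) none) else text
    let severity :=
      if PySem.Str.isIn "[CRITICAL]" text then "CRITICAL"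
      else if PySem.Str.isIn "[HIGH]" text then "HIGH"
      else if PySem.Str.isIn "[LOW]" text then "LOW"
      else "MEDIUM"
    (issues, ((((PySem.Dict.empty.insert "severity" severity).insert "summary" text).insert "file" "").insert "line" "").insert "fix" "")
  else if PySem.Str.startswith stripped "FILE:" || PySem.Str.startswith stripped "**FILE:" then
    (issues, current.insert "file" (PySem.Str.stripChars (PySem.Str.strip (PySem.Str.slice (PySem.Str.lstrip (pyLstripStar stripped)) (some 5) none)) "`"))
  else if PySem.Str.startswith stripped "LINE:" then
    (issues, current.insert "line" (pyLstripTilde (PySem.Str.strip (PySem.Str.slice stripped (some 5) none))))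
  else if PySem.Str.startswith stripped "FIX:" || PySem.Str.startswith stripped "Fix:" then
    (issues, current.insert "fix" (PySem.Str.strip (PySem.Str.slice stripped (some 4) none)))
  else (issues, current)

def finishA (st : List (List (String × String)) × PySem.Dict String String) : List (List (String × String)) :=
  if (st.2.getD "summary" "") ≠ "" then st.1 ++ [st.2.items] else st.1

def runA (ls : List String) (st : List (List (String × String)) × PySem.Dict String String) :
    List (List (String × String)) := finishA (ls.foldl stepS st)

def mkD (σ τ f l x : String) : PySem.Dict String String :=
  ⟨[("severity", σ), ("summary", τ), ("file", f), ("line", l), ("fix", x)]⟩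

def texD (s : String) : String :=
  let t := PySem.Str.lstrip (pyLstripStar s)
  if PySem.Str.startswith t "ISSUE:" then PySem.Str.strip (PySem.Str.slice t (some 6) none) else t

def sevD (t : String) : String :=
  ((altSevTags.find? (fun p => PySem.Str.isIn p.2 t)).map Prod.fst).getD "MEDIUM"

def exFile (s : String) : String :=
  PySem.Str.stripChars (PySem.Str.strip (PySem.Str.slice (PySem.Str.lstrip (pyLstripStar s)) (some 5) none)) "`"
def exLine (s : String) : String :=
  pyLstripTilde (PySem.Str.strip (PySem.Str.slice s (some 5) none))
def exFix (s : String) : String :=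
  PySem.Str.strip (PySem.Str.slice s (some 4) none)

def isFileL (s : String) : Bool := PySem.Str.startswith s "FILE:" || PySem.Str.startswith s "**FILE:"
def isLineL (s : String) : Bool := PySem.Str.startswith s "LINE:"
def isFixL (s : String) : Bool := PySem.Str.startswith s "FIX:" || PySem.Str.startswith s "Fix:"

def lastW (p : String → Bool) (ex : String → String) (body : List String) (dflt : String) : String :=
  ((body.reverse.find? p).map ex).getD dflt

def pBalt (ls : List String) : List (List (String × String)) :=
  (altBlocks (ls.dropWhile (fun s => !altIsIssue s))).filterMap (fun b => altParseBlock b.1 b.2)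

lemma sev_chain_eq (t : String) :
    (if PySem.Str.isIn "[CRITICAL]" t then "CRITICAL"
     else if PySem.Str.isIn "[HIGH]" t then "HIGH"
     else if PySem.Str.isIn "[LOW]" t then "LOW"
     else "MEDIUM") = sevD t := by
  unfold sevD altSevTags
  by_cases h1 : PySem.Str.isIn "[CRITICAL]" t <;> by_cases h2 : PySem.Str.isIn "[HIGH]" t <;>
    by_cases h3 : PySem.Str.isIn "[LOW]" t <;>
    simp [PySem.Str.isIn] at h1 h2 h3 <;> simp [List.find?, h1, h2, h3]

lemma getD_mkD_summary (σ τ f l x : String) : (mkD σ τ f l x).getD "summary" "" = τ := by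
  simp [mkD, PySem.Dict.getD, PySem.Dict.get?]

lemma mkD_insert_file (σ τ f l x v : String) : (mkD σ τ f l x).insert "file" v = mkD σ τ v l x := by
  simp [mkD, PySem.Dict.insert, PySem.Dict.contains]
lemma mkD_insert_line (σ τ f l x v : String) : (mkD σ τ f l x).insert "line" v = mkD σ τ f v x := by
  simp [mkD, PySem.Dict.insert, PySem.Dict.contains]
lemma mkD_insert_fix (σ τ f l x v : String) : (mkD σ τ f l x).insert "fix" v = mkD σ τ f l v := by
  simp [mkD, PySem.Dict.insert, PySem.Dict.contains]

lemma fresh_chain_eq (σ τ : String) :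
    ((((PySem.Dict.empty.insert "severity" σ).insert "summary" τ).insert "file" "").insert "line" "").insert "fix" ""
      = mkD σ τ "" "" "" := by
  simp [mkD, PySem.Dict.insert, PySem.Dict.contains, PySem.Dict.empty]

lemma lastW_cons (p : String → Bool) (ex : String → String) (s : String) (body : List String) (dflt : String) :
    lastW p ex (s :: body) dflt = lastW p ex body (if p s then ex s else dflt) := by
  unfold lastW
  rw [List.reverse_cons, List.find?_append]
  cases h : body.reverse.find? p <;> simp <;> split <;> simp [List.find?, *]

lemma not_prefix_trans {p q s : List Char} (h : p <+: s) (h2 : ¬ p <+: q) (h3 : ¬ q <+: p) : ¬ q <+: s := by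
  intro hq
  rcases List.prefix_or_prefix_of_prefix h hq with h' | h'
  · exact h2 h'
  · exact h3 h'

lemma sw_false_of {s : String} {p q : List Char} (h : p <+: s.toList) (h2 : ¬ p <+: q) (h3 : ¬ q <+: p) :
    PySem.Chars.startswith s.toList q = false := by
  rw [Bool.eq_false_iff]
  intro hq
  exact not_prefix_trans h h2 h3 (PySem.Chars.startswith_iff _ _ |>.mp hq)

lemma file_not_line {s : String} (h : isFileL s = true) : isLineL s = false := by
  simp [isFileL, isLineL] at *
  rcases h with h | h <;>
    exact sw_false_of (PySem.Chars.startswith_iff _ _ |>.mp h) (by decide) (by decide)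
lemma file_not_fix {s : String} (h : isFileL s = true) : isFixL s = false := by
  simp [isFileL, isFixL] at *
  refine ⟨?_, ?_⟩ <;> rcases h with h | h <;>
    exact sw_false_of (PySem.Chars.startswith_iff _ _ |>.mp h) (by decide) (by decide)
lemma line_not_fix {s : String} (h : isLineL s = true) : isFixL s = false := by
  simp [isLineL, isFixL] at *
  constructor <;>
    exact sw_false_of (PySem.Chars.startswith_iff _ _ |>.mp h) (by decide) (by decide)

-- stepS on a classified (already-stripped) line
lemma stepS_issue (st : List (List (String × String)) × PySem.Dict String String) (s : String)
    (h : altIsIssue s = true) :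
    stepS st s = (if (st.2.getD "summary" "") ≠ "" then st.1 ++ [st.2.items] else st.1,
                  mkD (sevD (texD s)) (texD s) "" "" "") := by
  unfold altIsIssue at h
  rw [← fresh_chain_eq, ← sev_chain_eq]
  simp only [stepS, h, if_true]
  rfl

lemma stepS_file (st : List (List (String × String)) × PySem.Dict String String) (s : String)
    (hI : altIsIssue s = false) (hF : isFileL s = true) :
    stepS st s = (st.1, st.2.insert "file" (exFile s)) := by
  unfold altIsIssue at hI; unfold isFileL at hF
  simp only [stepS, hI, hF, Bool.false_eq_true, if_false, if_true]
  rfl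

lemma stepS_line (st : List (List (String × String)) × PySem.Dict String String) (s : String)
    (hI : altIsIssue s = false) (hF : isFileL s = false) (hL : isLineL s = true) :
    stepS st s = (st.1, st.2.insert "line" (exLine s)) := by
  unfold altIsIssue at hI; unfold isFileL at hF; unfold isLineL at hL
  simp only [stepS, hI, hF, hL, Bool.false_eq_true, if_false, if_true]
  rfl

lemma stepS_fix (st : List (List (String × String)) × PySem.Dict String String) (s : String)
    (hI : altIsIssue s = false) (hF : isFileL s = false) (hL : isLineL s = false) (hX : isFixL s = true) :
    stepS st s = (st.1, st.2.insert "fix" (exFix s)) := by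
  unfold altIsIssue at hI; unfold isFileL at hF; unfold isLineL at hL; unfold isFixL at hX
  simp only [stepS, hI, hF, hL, hX, Bool.false_eq_true, if_false, if_true]
  rfl

lemma stepS_other (st : List (List (String × String)) × PySem.Dict String String) (s : String)
    (hI : altIsIssue s = false) (hF : isFileL s = false) (hL : isLineL s = false) (hX : isFixL s = false) :
    stepS st s = st := by
  unfold altIsIssue at hI; unfold isFileL at hF; unfold isLineL at hL; unfold isFixL at hX
  simp only [stepS, hI, hF, hL, hX, Bool.false_eq_true, if_false]

lemma runA_cons (s : String) (t : List String) (st : List (List (String × String)) × PySem.Dict String String) :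
    runA (s :: t) st = runA t (stepS st s) := rfl

lemma pBalt_cons_skip (s : String) (t : List String) (h : altIsIssue s = false) :
    pBalt (s :: t) = pBalt t := by
  simp [pBalt, h]

lemma pBalt_cons_issue (s : String) (t : List String) (h : altIsIssue s = true) :
    pBalt (s :: t) =
      (if texD s = "" then []
       else [[("severity", sevD (texD s)), ("summary", texD s),
              ("file", lastW isFileL exFile (t.takeWhile (fun u => !altIsIssue u)) ""),
              ("line", lastW isLineL exLine (t.takeWhile (fun u => !altIsIssue u)) ""),
              ("fix", lastW isFixL exFix (t.takeWhile (fun u => !altIsIssue u)) "")]])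
      ++ pBalt t := by
  unfold pBalt
  rw [List.dropWhile_cons_of_neg (by simp [h])]
  rw [altBlocks]
  rw [List.filterMap_cons]
  have hpb : altParseBlock s (t.takeWhile (fun u => !altIsIssue u)) =
      if texD s = "" then none
      else some [("severity", sevD (texD s)), ("summary", texD s),
                 ("file", lastW isFileL exFile (t.takeWhile (fun u => !altIsIssue u)) ""),
                 ("line", lastW isLineL exLine (t.takeWhile (fun u => !altIsIssue u)) ""),
                 ("fix", lastW isFixL exFix (t.takeWhile (fun u => !altIsIssue u)) "")] := rfl
  rw [hpb]
  by_cases hq : texD s = "" <;> simp [hq]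

-- in-block invariant
lemma runA_block (t : List String) : ∀ (iss : List (List (String × String))) (σ τ f l x : String),
    runA t (iss, mkD σ τ f l x) =
      (if τ = "" then iss
       else iss ++ [[("severity", σ), ("summary", τ),
                     ("file", lastW isFileL exFile (t.takeWhile (fun s => !altIsIssue s)) f),
                     ("line", lastW isLineL exLine (t.takeWhile (fun s => !altIsIssue s)) l),
                     ("fix", lastW isFixL exFix (t.takeWhile (fun s => !altIsIssue s)) x)]])
      ++ pBalt t := by
  induction t with
  | nil =>
      intro iss σ τ f l x
      simp only [runA, List.foldl_nil, finishA, getD_mkD_summary, List.takeWhile_nil, pBalt,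
        List.dropWhile_nil, altBlocks, List.filterMap_nil, List.append_nil, lastW,
        List.reverse_nil, List.find?_nil, Option.map_none, Option.getD_none]
      split <;> simp_all [mkD, PySem.Dict.items]
  | cons s t ih =>
      intro iss σ τ f l x
      rw [runA_cons]
      by_cases hI : altIsIssue s
      · rw [stepS_issue _ _ hI, pBalt_cons_issue _ _ hI]
        simp only [getD_mkD_summary]
        rw [List.takeWhile_cons_of_neg (by simp [hI])]
        simp only [lastW, List.reverse_nil, List.find?_nil, Option.map_none, Option.getD_none]
        rw [ih]
        by_cases hτ : τ = "" <;> by_cases hτ' : texD s = "" <;>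
          simp [hτ, hτ', mkD, PySem.Dict.items, List.append_assoc, lastW]
      · have hI' : (!altIsIssue s) = true := by simp [hI]
        rw [pBalt_cons_skip _ _ (by simpa using hI), List.takeWhile_cons_of_pos (p := fun u => !altIsIssue u) (l := t) hI']
        by_cases hF : isFileL s
        · rw [stepS_file _ _ (by simpa using hI) hF]
          simp only [mkD_insert_file]
          rw [ih]
          rw [lastW_cons isFileL, lastW_cons isLineL, lastW_cons isFixL,
              hF, file_not_line hF, file_not_fix hF]
          simp
        · by_cases hL : isLineL s
          · rw [stepS_line _ _ (by simpa using hI) (by simpa using hF) hL]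
            simp only [mkD_insert_line]
            rw [ih]
            rw [lastW_cons isFileL, lastW_cons isLineL, lastW_cons isFixL,
                (by simpa using hF : isFileL s = false), hL, line_not_fix hL]
            simp
          · by_cases hX : isFixL s
            · rw [stepS_fix _ _ (by simpa using hI) (by simpa using hF) (by simpa using hL) hX]
              simp only [mkD_insert_fix]
              rw [ih]
              rw [lastW_cons isFileL, lastW_cons isLineL, lastW_cons isFixL,
                  (by simpa using hF : isFileL s = false), (by simpa using hL : isLineL s = false), hX]
              simp
            · rw [stepS_other _ _ (by simpa using hI) (by simpa using hF) (by simpa using hL)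
                  (by simpa using hX)]
              rw [ih]
              rw [lastW_cons isFileL, lastW_cons isLineL, lastW_cons isFixL,
                  (by simpa using hF : isFileL s = false), (by simpa using hL : isLineL s = false),
                  (by simpa using hX : isFixL s = false)]
              simp

-- preamble invariant
lemma runA_pre (ls : List String) : ∀ (iss : List (List (String × String))) (cur : PySem.Dict String String),
    cur.getD "summary" "" = "" → runA ls (iss, cur) = iss ++ pBalt ls := by
  induction ls with
  | nil =>
      intro iss cur h
      simp [runA, finishA, h, pBalt, altBlocks]
  | cons s t ih =>
      intro iss cur h
      rw [runA_cons]
      by_cases hI : altIsIssue s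
      · rw [stepS_issue _ _ hI, pBalt_cons_issue _ _ hI]
        simp only [h, ne_eq, not_true_eq_false, if_false, ite_not]
        rw [runA_block]
        by_cases hτ : texD s = "" <;> simp [hτ, List.append_assoc]
      · rw [pBalt_cons_skip _ _ (by simpa using hI)]
        by_cases hF : isFileL s
        · rw [stepS_file _ _ (by simpa using hI) hF]
          exact ih iss _ (by rw [PySem.Dict.getD_insert_of_ne _ _ _ (by decide)]; exact h)
        · by_cases hL : isLineL s
          · rw [stepS_line _ _ (by simpa using hI) (by simpa using hF) hL]
            exact ih iss _ (by rw [PySem.Dict.getD_insert_of_ne _ _ _ (by decide)]; exact h)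
          · by_cases hX : isFixL s
            · rw [stepS_fix _ _ (by simpa using hI) (by simpa using hF) (by simpa using hL) hX]
              exact ih iss _ (by rw [PySem.Dict.getD_insert_of_ne _ _ _ (by decide)]; exact h)
            · rw [stepS_other _ _ (by simpa using hI) (by simpa using hF) (by simpa using hL)
                  (by simpa using hX)]
              exact ih iss _ h

-- ===== VERDICT (by name: the statement is the Claim_ definition above) =====
theorem parse_review_issues_py_spec : Claim_equal_parse_review_issues_py := by
  intro r _hDom
  unfold Spec_parse_review_issues_py parse_review_issues_py parse_review_issues_py_alt
  cases h : PySem.Str.split? r "\n" with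
  | none => rfl
  | some lines =>
      have h1 : lines.foldl pyIssueStep ([], PySem.Dict.empty)
          = (lines.map PySem.Str.strip).foldl stepS ([], PySem.Dict.empty) := by
        rw [show pyIssueStep = (fun st l => stepS st (PySem.Str.strip l)) from rfl,
            List.foldl_map]
      show finishA (lines.foldl pyIssueStep ([], PySem.Dict.empty)) = _
      rw [h1]
      have := runA_pre (lines.map PySem.Str.strip) [] PySem.Dict.empty rfl
      simpa [runA, pBalt] using this
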